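-- pv_equiv track=rewrite | github.com/gegebenheiten/trial_agent | tools/ctg_extract_v2/fill_table_with_llm.py | order_fields_for_table
-- ===== SOURCE A (Python) =====
-- from typing import Callable, Dict, Iterable, List, Optional, TextIO, Tuple
--
-- def order_fields_for_table(table: str, fields: List[str]) -> List[str]:
--     if table == "Design":
--         priority = [
--             "Route_Admin",
--             "Treat_Duration",
--             "Add_On_Treat",
--             "Adherence_Treat",
--             "Enroll_Duration_Plan",
--             "FU_Duration_Plan",
--             "Central_Lab",
--             "Run_in",
--             "GCP_Compliance",
--             "Data_Cutoff_Date",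
--         ]
--     elif table == "Stat_Reg":
--         priority = [
--             "Central_Random",
--             "Rand_Ratio",
--             "No_Stratification",
--             "IRC",
--             "Subgroup",
--             "Adaptive_Design",
--             "Interim",
--             "Timing_IA",
--             "Alpha",
--             "Sided",
--             "Power",
--             "Alpha_Spend_Func",
--             "Gatekeeping_Strategy",
--             "Consistency_Sens_Ana_PE",
--             "Consistency_Sens_Ana_SE",
--             "Post_Hoc_Ana",
--             "Intercurrent_Events",
--             "Success_Criteria_Text",
--             "Reg_Alignment",
--             "Reg_Audit",
--             "Consistency_MRCT",
--             "Fast_Track",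
--             "Breakthrough",
--             "Priority_Review",
--             "Accelerated_App",
--             "Orphan_Drug",
--             "Pediatric",
--             "Rare_Disease",
--         ]
--     elif table == "Endpoints":
--         priority = [
--             "Strategy",
--             "Missing_Imput",
--             "Covariate_Adjust",
--             "MCP",
--             "Subgroup_Ana",
--             "EP_Value",
--             "EP_Unit",
--             "EP_Point",
--             "EP_95CI",
--             "ARR",
--             "NNT",
--             "Med_OS",
--             "OS_YrX",
--             "Med_PFS",
--             "ORR",
--             "pCR",
--             "Med_DOR",
--             "RMST",
--             "PRO",
--             "QoL",
--         ]
--     else: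
--         return list(fields)
--     fields_set = set(fields)
--     ordered = [field for field in priority if field in fields_set]
--     seen = set(ordered)
--     for field in fields:
--         if field in seen:
--             continue
--         ordered.append(field)
--         seen.add(field)
--     return ordered
-- ===== SOURCE B (Python) =====
-- from typing import List
--
-- _PRIORITIES = {
--     "Design": [
--         "Route_Admin", "Treat_Duration", "Add_On_Treat", "Adherence_Treat",
--         "Enroll_Duration_Plan", "FU_Duration_Plan", "Central_Lab", "Run_in",
--         "GCP_Compliance", "Data_Cutoff_Date",
--     ],
--     "Stat_Reg": [
--         "Central_Random", "Rand_Ratio", "No_Stratification", "IRC", "Subgroup",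
--         "Adaptive_Design", "Interim", "Timing_IA", "Alpha", "Sided", "Power",
--         "Alpha_Spend_Func", "Gatekeeping_Strategy", "Consistency_Sens_Ana_PE",
--         "Consistency_Sens_Ana_SE", "Post_Hoc_Ana", "Intercurrent_Events",
--         "Success_Criteria_Text", "Reg_Alignment", "Reg_Audit", "Consistency_MRCT",
--         "Fast_Track", "Breakthrough", "Priority_Review", "Accelerated_App",
--         "Orphan_Drug", "Pediatric", "Rare_Disease",
--     ],
--     "Endpoints": [
--         "Strategy", "Missing_Imput", "Covariate_Adjust", "MCP", "Subgroup_Ana",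
--         "EP_Value", "EP_Unit", "EP_Point", "EP_95CI", "ARR", "NNT", "Med_OS",
--         "OS_YrX", "Med_PFS", "ORR", "pCR", "Med_DOR", "RMST", "PRO", "QoL",
--     ],
-- }
--
--
-- def order_fields_for_table(table: str, fields: List[str]) -> List[str]:
--     priority = _PRIORITIES.get(table)
--     if priority is None:
--         return list(fields)
--     rank = {name: i for i, name in enumerate(priority)}
--     npr = len(priority)
--     seen = set()
--     uniq = []  # (field, first-occurrence index), deduplicated in one pass
--     for i, field in enumerate(fields):
--         if field not in seen:
--             seen.add(field)
--             uniq.append((field, i))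
--     uniq.sort(key=lambda p: (rank.get(p[0], npr), p[1]))
--     return [field for field, _ in uniq]
-- ===== Notes on version B (the rewrite author's own statement) =====
-- stated objective: alternative
-- what changed: A's two filtering passes (priority filtered against a field set, then a seen-set append loop) are replaced by one dedup-with-first-index pass plus a single stable sort keyed by (priority rank from a precomputed rank dict, first-occurrence index).
import Mathlib
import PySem

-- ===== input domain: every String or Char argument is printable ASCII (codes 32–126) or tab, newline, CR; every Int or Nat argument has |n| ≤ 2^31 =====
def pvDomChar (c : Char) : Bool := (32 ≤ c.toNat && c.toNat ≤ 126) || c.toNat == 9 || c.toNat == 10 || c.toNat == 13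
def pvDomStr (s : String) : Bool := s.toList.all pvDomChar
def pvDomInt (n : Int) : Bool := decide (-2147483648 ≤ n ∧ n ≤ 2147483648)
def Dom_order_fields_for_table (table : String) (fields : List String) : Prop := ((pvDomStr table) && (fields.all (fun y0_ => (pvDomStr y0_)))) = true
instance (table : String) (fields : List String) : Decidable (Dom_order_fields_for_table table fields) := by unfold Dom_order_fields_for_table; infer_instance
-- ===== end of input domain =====

-- B replaces A's two filtering passes by one dedup-with-first-index pass plus a single
-- stable sort keyed by (priority rank, first occurrence); alternative decomposition, not claimed faster.

-- ===== PORT A =====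
-- the three priority tables (shared literal data; both ports dispatch on them)
def pvPriorityDesign : List String :=
  ["Route_Admin", "Treat_Duration", "Add_On_Treat", "Adherence_Treat",
   "Enroll_Duration_Plan", "FU_Duration_Plan", "Central_Lab", "Run_in",
   "GCP_Compliance", "Data_Cutoff_Date"]
def pvPriorityStatReg : List String :=
  ["Central_Random", "Rand_Ratio", "No_Stratification", "IRC", "Subgroup",
   "Adaptive_Design", "Interim", "Timing_IA", "Alpha", "Sided", "Power",
   "Alpha_Spend_Func", "Gatekeeping_Strategy", "Consistency_Sens_Ana_PE",
   "Consistency_Sens_Ana_SE", "Post_Hoc_Ana", "Intercurrent_Events",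
   "Success_Criteria_Text", "Reg_Alignment", "Reg_Audit", "Consistency_MRCT",
   "Fast_Track", "Breakthrough", "Priority_Review", "Accelerated_App",
   "Orphan_Drug", "Pediatric", "Rare_Disease"]
def pvPriorityEndpoints : List String :=
  ["Strategy", "Missing_Imput", "Covariate_Adjust", "MCP", "Subgroup_Ana",
   "EP_Value", "EP_Unit", "EP_Point", "EP_95CI", "ARR", "NNT", "Med_OS",
   "OS_YrX", "Med_PFS", "ORR", "pCR", "Med_DOR", "RMST", "PRO", "QoL"]

-- A's shared tail after the dispatch: fields_set = set(fields); ordered = [f for f in priority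
-- if f in fields_set]; seen = set(ordered); for f in fields: if f not in seen: append
def pvTailA (priority : List String) (fields : List String) : List String :=
  let fields_set : PySem.Set String := PySem.Set.ofList fields
  let ordered : List String := priority.filter (fun field => PySem.Set.contains fields_set field)
  let seen : PySem.Set String := PySem.Set.ofList ordered
  (fields.foldl
    (fun (st : List String × PySem.Set String) field =>
      if PySem.Set.contains st.2 field then st
      else (st.1 ++ [field], PySem.Set.add st.2 field))
    (ordered, seen)).1

def order_fields_for_table (table : String) (fields : List String) : List String :=
  if table == "Design" then pvTailA pvPriorityDesign fields
  else if table == "Stat_Reg" then pvTailA pvPriorityStatReg fields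
  else if table == "Endpoints" then pvTailA pvPriorityEndpoints fields
  else fields

-- ===== PORT B =====
-- the module-level _PRIORITIES dict of Source B
def pvPriorities : PySem.Dict String (List String) :=
  PySem.Dict.ofList
    [("Design", pvPriorityDesign), ("Stat_Reg", pvPriorityStatReg), ("Endpoints", pvPriorityEndpoints)]

-- B's tail: rank = {name: i}; one dedup pass recording first indices; one sort by (rank, index)
def pvTailB (priority : List String) (fields : List String) : List String :=
  let rank : PySem.Dict String Int :=
    (PySem.List.enumerate priority).foldl (fun d p => d.insert p.2 p.1) PySem.Dict.empty
  let npr : Int := (priority.length : Int)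
  let uniq : List (String × Int) :=
    ((PySem.List.enumerate fields).foldl
      (fun (st : PySem.Set String × List (String × Int)) p =>
        if PySem.Set.contains st.1 p.2 then st
        else (PySem.Set.add st.1 p.2, st.2 ++ [(p.2, p.1)]))
      (PySem.Set.empty, [])).2
  (PySem.List.sorted2 uniq (fun p => rank.getD p.1 npr) (fun p => p.2)).map (fun p => p.1)

def order_fields_for_table_alt (table : String) (fields : List String) : List String :=
  match pvPriorities.get? table with
  | none => fields
  | some priority => pvTailB priority fields

-- ===== PRECONDITION & SPEC =====
def Spec_order_fields_for_table (table : String) (fields : List String) (out : List String) : Prop := out = order_fields_for_table_alt table fields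
instance (table : String) (fields : List String) (out : List String) : Decidable (Spec_order_fields_for_table table fields out) := by unfold Spec_order_fields_for_table; infer_instance

-- ===== CLAIM (what is proved, stated in full; the proofs are below) =====
def Claim_equal_order_fields_for_table : Prop := ∀ (table : String) (fields : List String), Dom_order_fields_for_table table fields → Spec_order_fields_for_table table fields (order_fields_for_table table fields)

-- ===== LEMMAS AND PROOFS =====

-- first occurrences of fs not already in seen, in order
def pvAdd (fs : List String) (seen : List String) : List String :=
  match fs with
  | [] => []
  | f :: r => if f ∈ seen then pvAdd r seen else f :: pvAdd r (f :: seen)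

-- same, paired with the index at which each first occurrence happens
def pvUniq (fs : List String) (s : Int) (seen : List String) : List (String × Int) :=
  match fs with
  | [] => []
  | f :: r => if f ∈ seen then pvUniq r (s + 1) seen else (f, s) :: pvUniq r (s + 1) (f :: seen)

lemma pvAdd_congr (fs : List String) (s₁ s₂ : List String)
    (h : ∀ x, x ∈ s₁ ↔ x ∈ s₂) : pvAdd fs s₁ = pvAdd fs s₂ := by
  induction fs generalizing s₁ s₂ with
  | nil => rfl
  | cons f r ih =>
      simp only [pvAdd]
      by_cases hf : f ∈ s₁
      · rw [if_pos hf, if_pos ((h f).1 hf), ih _ _ h]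
      · rw [if_neg hf, if_neg (fun hc => hf ((h f).2 hc))]
        rw [ih (f :: s₁) (f :: s₂) (by intro x; simp [h x])]

lemma pvUniq_congr (fs : List String) (s : Int) (s₁ s₂ : List String)
    (h : ∀ x, x ∈ s₁ ↔ x ∈ s₂) : pvUniq fs s s₁ = pvUniq fs s s₂ := by
  induction fs generalizing s s₁ s₂ with
  | nil => rfl
  | cons f r ih =>
      simp only [pvUniq]
      by_cases hf : f ∈ s₁
      · rw [if_pos hf, if_pos ((h f).1 hf), ih _ _ _ h]
      · rw [if_neg hf, if_neg (fun hc => hf ((h f).2 hc))]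
        rw [ih _ (f :: s₁) (f :: s₂) (by intro x; simp [h x])]

lemma pvUniq_map_fst (fs : List String) (s : Int) (seen : List String) :
    (pvUniq fs s seen).map Prod.fst = pvAdd fs seen := by
  induction fs generalizing s seen with
  | nil => rfl
  | cons f r ih =>
      simp only [pvUniq, pvAdd]
      by_cases hf : f ∈ seen
      · rw [if_pos hf, if_pos hf, ih]
      · rw [if_neg hf, if_neg hf]; simp [ih]

lemma mem_pvAdd (fs : List String) (seen : List String) (x : String) :
    x ∈ pvAdd fs seen ↔ x ∈ fs ∧ x ∉ seen := by
  induction fs generalizing seen with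
  | nil => simp [pvAdd]
  | cons f r ih =>
      simp only [pvAdd]
      by_cases hf : f ∈ seen
      · rw [if_pos hf, ih]
        by_cases hx : x = f <;> simp [hx, hf]
      · rw [if_neg hf]
        by_cases hx : x = f
        · subst hx; simp [hf]
        · simp [hx, ih]

lemma nodup_pvAdd (fs : List String) (seen : List String) : (pvAdd fs seen).Nodup := by
  induction fs generalizing seen with
  | nil => exact List.nodup_nil
  | cons f r ih =>
      simp only [pvAdd]
      by_cases hf : f ∈ seen
      · rw [if_pos hf]; exact ih seen
      · rw [if_neg hf]
        refine List.nodup_cons.2 ⟨fun hc => ?_, ih _⟩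
        have := (mem_pvAdd r (f :: seen) f).1 hc
        simp at this

lemma snd_ge_pvUniq (fs : List String) (s : Int) (seen : List String) :
    ∀ q ∈ pvUniq fs s seen, s ≤ q.2 := by
  induction fs generalizing s seen with
  | nil => simp [pvUniq]
  | cons f r ih =>
      intro q hq
      simp only [pvUniq] at hq
      by_cases hf : f ∈ seen
      · rw [if_pos hf] at hq; have := ih (s + 1) seen q hq; omega
      · rw [if_neg hf] at hq
        rcases List.mem_cons.1 hq with h | h
        · subst h; simp
        · have := ih (s + 1) (f :: seen) q h; omega

lemma pairwise_snd_pvUniq (fs : List String) (s : Int) (seen : List String) :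
    (pvUniq fs s seen).Pairwise (fun a b => a.2 < b.2) := by
  induction fs generalizing s seen with
  | nil => exact List.Pairwise.nil
  | cons f r ih =>
      simp only [pvUniq]
      by_cases hf : f ∈ seen
      · rw [if_pos hf]; exact ih (s + 1) seen
      · rw [if_neg hf]
        refine List.pairwise_cons.2 ⟨fun q hq => ?_, ih _ _⟩
        have := snd_ge_pvUniq r (s + 1) (f :: seen) q hq
        simp; omega

-- splitting the seen set: the part excluded by s₁ is a filter
lemma pvAdd_append_seen (fs : List String) (s₁ s₂ : List String) :
    pvAdd fs (s₁ ++ s₂) = (pvAdd fs s₂).filter (fun x => decide (x ∉ s₁)) := by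
  induction fs generalizing s₂ with
  | nil => rfl
  | cons f r ih =>
      simp only [pvAdd]
      by_cases h2 : f ∈ s₂
      · rw [if_pos (by simp [h2]), if_pos h2, ih]
      · rw [if_neg h2]
        by_cases h1 : f ∈ s₁
        · rw [if_pos (by simp [h1])]
          have : pvAdd r (s₁ ++ s₂) = pvAdd r (s₁ ++ f :: s₂) :=
            pvAdd_congr r _ _ (by intro x; by_cases hx : x = f <;> simp [hx, h1])
          rw [this, ih (f :: s₂)]
          simp [h1]
        · rw [if_neg (by simp [h1, h2])]
          have : pvAdd r (f :: (s₁ ++ s₂)) = pvAdd r (s₁ ++ f :: s₂) :=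
            pvAdd_congr r _ _ (by intro x; by_cases hx : x = f <;> simp [hx])
          rw [this, ih (f :: s₂)]
          simp [h1]

lemma pvAdd_eq_filter (fs : List String) (seen : List String) :
    pvAdd fs seen = (pvAdd fs []).filter (fun x => decide (x ∉ seen)) := by
  have := pvAdd_append_seen fs seen []
  simpa using this

-- A's append loop produces acc ++ pvAdd fs acc
lemma foldA_eq (fs : List String) (acc : List String) (seen : PySem.Set String)
    (hinv : ∀ x, x ∈ seen ↔ x ∈ acc) :
    (fs.foldl
      (fun (st : List String × PySem.Set String) field =>
        if PySem.Set.contains st.2 field then st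
        else (st.1 ++ [field], PySem.Set.add st.2 field))
      (acc, seen)).1 = acc ++ pvAdd fs acc := by
  induction fs generalizing acc seen with
  | nil => simp [pvAdd]
  | cons f r ih =>
      simp only [List.foldl_cons, pvAdd]
      by_cases hf : f ∈ acc
      · rw [if_pos (by simpa [PySem.Set.contains_iff, hinv] using hf), if_pos hf]
        exact ih acc seen hinv
      · rw [if_neg (by simpa [PySem.Set.contains_iff, hinv] using hf), if_neg hf]
        have := ih (acc ++ [f]) (PySem.Set.add seen f)
          (by intro x; simp [PySem.Set.mem_add, hinv, or_comm])
        simp only [this]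
        rw [pvAdd_congr r (acc ++ [f]) (f :: acc) (by intro x; simp [or_comm])]
        simp

-- B's dedup loop produces acc ++ pvUniq fs s seen
lemma foldB_eq (fs : List String) (s : Int) (seen : PySem.Set String)
    (acc : List (String × Int)) :
    (((PySem.List.enumerate fs s).foldl
      (fun (st : PySem.Set String × List (String × Int)) p =>
        if PySem.Set.contains st.1 p.2 then st
        else (PySem.Set.add st.1 p.2, st.2 ++ [(p.2, p.1)]))
      (seen, acc))).2 = acc ++ pvUniq fs s seen := by
  induction fs generalizing s seen acc with
  | nil => simp [PySem.List.enumerate_nil, pvUniq]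
  | cons f r ih =>
      rw [PySem.List.enumerate_cons]
      simp only [List.foldl_cons, pvUniq]
      by_cases hf : f ∈ (seen : List String)
      · rw [if_pos (by simpa [PySem.Set.contains_iff] using hf), if_pos hf]
        exact ih (s + 1) seen acc
      · rw [if_neg (by simpa [PySem.Set.contains_iff] using hf), if_neg hf]
        rw [ih (s + 1) (PySem.Set.add seen f) (acc ++ [(f, s)])]
        rw [pvUniq_congr r (s + 1) (PySem.Set.add seen f) (f :: seen)
          (by intro x; simp [PySem.Set.mem_add, or_comm])]
        simp

-- the rank dict lookup: position in priority, or the default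
lemma pvRank_getD (p : List String) (hp : p.Nodup) (s : Int) (d : PySem.Dict String Int)
    (f : String) (v : Int) :
    ((PySem.List.enumerate p s).foldl (fun d q => d.insert q.2 q.1) d).getD f v
      = if f ∈ p then s + (p.idxOf f : Int) else d.getD f v := by
  induction p generalizing s d with
  | nil => simp [PySem.List.enumerate_nil]
  | cons a r ih =>
      rw [PySem.List.enumerate_cons]
      simp only [List.foldl_cons]
      have hnd := List.nodup_cons.1 hp
      rw [ih hnd.2 (s + 1) (d.insert a s)]
      by_cases hf : f = a
      · subst hf
        rw [if_neg hnd.1, if_pos (List.mem_cons_self), PySem.Dict.getD_insert_self]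
        simp [List.idxOf_cons_self]
      · by_cases hr : f ∈ r
        · rw [if_pos hr, if_pos (List.mem_cons_of_mem a hr)]
          rw [List.idxOf_cons_ne _ (fun h => hf h.symm)]
          push_cast; ring
        · rw [if_neg hr, if_neg (by simp [hf, hr])]
          exact PySem.Dict.getD_insert_of_ne d s v hf

-- distinct firsts determine the pair
lemma pv_eq_of_fst_eq (l : List (String × Int)) (h : (l.map Prod.fst).Nodup)
    (q q' : String × Int) (hq : q ∈ l) (hq' : q' ∈ l) (hfst : q.1 = q'.1) : q = q' := by
  induction l with
  | nil => cases hq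
  | cons a t ih =>
      simp only [List.map_cons, List.nodup_cons] at h
      rcases List.mem_cons.1 hq with rfl | hq2
      · rcases List.mem_cons.1 hq' with rfl | hq2'
        · rfl
        · refine absurd ?_ h.1
          rw [hfst]; exact List.mem_map_of_mem hq2'
      · rcases List.mem_cons.1 hq' with rfl | hq2'
        · refine absurd ?_ h.1
          rw [← hfst]; exact List.mem_map_of_mem hq2
        · exact ih h.2 hq2 hq2'

lemma filterMap_find?_map_fst (l : List (String × Int)) (p : List String) :
    ((p.filterMap (fun f => l.find? (fun q => q.1 == f))).map Prod.fst)
      = p.filter (fun f => (l.find? (fun q => q.1 == f)).isSome) := by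
  induction p with
  | nil => rfl
  | cons f r ih =>
      simp only [List.filterMap_cons, List.filter_cons]
      cases h : l.find? (fun q => q.1 == f) with
      | none => simp [ih]
      | some q =>
          have hq : q.1 = f := by simpa using List.find?_some h
          simp [ih, hq]

lemma mem_filterMap_find? (l : List (String × Int)) (hnd : (l.map Prod.fst).Nodup)
    (p : List String) (q : String × Int) :
    q ∈ p.filterMap (fun f => l.find? (fun q => q.1 == f)) ↔ q ∈ l ∧ q.1 ∈ p := by
  constructor
  · intro h
    rcases List.mem_filterMap.1 h with ⟨f, hf, hfind⟩
    have hql := List.mem_of_find?_eq_some hfind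
    have hq1 : q.1 = f := by simpa using List.find?_some hfind
    exact ⟨hql, hq1 ▸ hf⟩
  · rintro ⟨hql, hqp⟩
    refine List.mem_filterMap.2 ⟨q.1, hqp, ?_⟩
    have hsome : (l.find? (fun r => r.1 == q.1)).isSome := by
      rw [List.find?_isSome]
      exact ⟨q, hql, by simp⟩
    rcases Option.isSome_iff_exists.1 hsome with ⟨q', hq'⟩
    have hq'l := List.mem_of_find?_eq_some hq'
    have hq'1 : q'.1 = q.1 := by simpa using List.find?_some hq'
    rw [hq', pv_eq_of_fst_eq l hnd q' q hq'l hql hq'1]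

-- sorted2 with two Int keys is sorted with the lexicographic key
lemma pv_sorted2_eq_sorted {α : Type} (xs : List α) (k1 k2 : α → Int) :
    PySem.List.sorted2 xs k1 k2
      = PySem.List.sorted xs (fun x => (toLex (k1 x, k2 x) : Lex (Int × Int))) := by
  unfold PySem.List.sorted2 PySem.List.sorted
  simp only [if_neg (by decide : ¬ (false = true))]
  have hbf : (fun a b => decide (k1 a < k1 b) || (!decide (k1 b < k1 a) && decide (k2 a < k2 b)))
      = (fun a b => decide ((toLex (k1 a, k2 a) : Lex (Int × Int)) < toLex (k1 b, k2 b))) := by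
    funext a b
    rw [Bool.eq_iff_iff]
    simp only [Bool.or_eq_true, Bool.and_eq_true, Bool.not_eq_true', decide_eq_true_eq,
      decide_eq_false_iff_not, Prod.Lex.lt_iff, ofLex_toLex]
    omega
  rw [hbf]

-- the central lemma: for a duplicate-free priority list the two tails agree
lemma pvTail_eq (p : List String) (hp : p.Nodup) (fs : List String) :
    pvTailA p fs = pvTailB p fs := by
  -- B's uniq list
  have he : (PySem.Set.empty : PySem.Set String) = ([] : List String) := rfl
  have huniq := foldB_eq fs 0 PySem.Set.empty []
  rw [he] at huniq
  simp only [List.nil_append] at huniq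
  set uniq : List (String × Int) := pvUniq fs 0 [] with huniqdef
  -- fst facts about uniq
  have hfst : uniq.map Prod.fst = pvAdd fs [] := pvUniq_map_fst fs 0 []
  have hfstnd : (uniq.map Prod.fst).Nodup := hfst ▸ nodup_pvAdd fs []
  have hnd : uniq.Nodup := hfstnd.of_map
  -- the rank key
  set npr : Int := (p.length : Int) with hnprdef
  have hkey : ∀ q : String × Int,
      ((PySem.List.enumerate p).foldl (fun d q => d.insert q.2 q.1) PySem.Dict.empty).getD q.1 npr
        = if q.1 ∈ p then (p.idxOf q.1 : Int) else npr := by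
    intro q
    rw [pvRank_getD p hp 0 PySem.Dict.empty q.1 npr]
    simp [PySem.Dict.getD_empty]
  -- target arrangement
  set ysA : List (String × Int) := p.filterMap (fun f => uniq.find? (fun q => q.1 == f)) with hysA
  set ysB : List (String × Int) := uniq.filter (fun q => !(decide (q.1 ∈ p))) with hysB
  have hmemA : ∀ q, q ∈ ysA ↔ q ∈ uniq ∧ q.1 ∈ p := mem_filterMap_find? uniq hfstnd p
  -- ysA nodup
  have hndA : ysA.Nodup := by
    refine List.Nodup.of_map Prod.fst ?_
    rw [hysA, filterMap_find?_map_fst]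
    exact hp.filter _
  -- permutation
  have hperm : (ysA ++ ysB).Perm uniq := by
    have hpA : ysA.Perm (uniq.filter (fun q => decide (q.1 ∈ p))) := by
      rw [List.perm_ext_iff_of_nodup hndA (hnd.filter _)]
      intro q
      rw [hmemA q, List.mem_filter]
      simp
    exact (hpA.append_right ysB).trans (List.filter_append_perm _ uniq)
  -- strict pairwise on the lexicographic key
  have hidxp : p.Pairwise (fun a b => p.idxOf a < p.idxOf b) := by
    rw [List.pairwise_iff_getElem]
    intro i j hi hj hij
    rw [List.Nodup.idxOf_getElem hp i hi, List.Nodup.idxOf_getElem hp j hj]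
    exact hij
  have hpw : (ysA ++ ysB).Pairwise (fun a b =>
      (toLex ((if a.1 ∈ p then (p.idxOf a.1 : Int) else npr), a.2) : Lex (Int × Int))
        < toLex ((if b.1 ∈ p then (p.idxOf b.1 : Int) else npr), b.2)) := by
    rw [List.pairwise_append]
    refine ⟨?_, ?_, ?_⟩
    · rw [hysA, List.pairwise_filterMap]
      refine hidxp.imp_of_mem ?_
      intro f g hf hg hlt q hqf q' hq'g
      have hq1 : q.1 = f := by simpa using List.find?_some hqf
      have hq'1 : q'.1 = g := by simpa using List.find?_some hq'g
      rw [Prod.Lex.lt_iff]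
      simp only [ofLex_toLex]
      left
      rw [if_pos (hq1 ▸ hf), if_pos (hq'1 ▸ hg), hq1, hq'1]
      exact_mod_cast hlt
    · have := (pairwise_snd_pvUniq fs 0 []).filter (fun q => !(decide (q.1 ∈ p)))
      rw [← huniqdef] at this
      refine this.imp_of_mem ?_
      intro a b ha hb hlt
      have hap : a.1 ∉ p := by simpa using (List.mem_filter.1 ha).2
      have hbp : b.1 ∉ p := by simpa using (List.mem_filter.1 hb).2
      rw [Prod.Lex.lt_iff]
      simp only [ofLex_toLex]
      right
      rw [if_neg hap, if_neg hbp]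
      exact ⟨rfl, hlt⟩
    · intro a ha b hb
      have hap : a.1 ∈ p := ((hmemA a).1 ha).2
      have hbp : b.1 ∉ p := by simpa using (List.mem_filter.1 hb).2
      rw [Prod.Lex.lt_iff]
      simp only [ofLex_toLex]
      left
      rw [if_pos hap, if_neg hbp, hnprdef]
      exact_mod_cast List.idxOf_lt_length_of_mem hap
  -- evaluate B
  unfold pvTailB
  simp only [he]
  rw [huniq, pv_sorted2_eq_sorted]
  have hsorted := PySem.List.sorted_eq_of_perm_of_pairwise_lt uniq (ysA ++ ysB)
      (fun q : String × Int =>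
        (toLex (((PySem.List.enumerate p).foldl (fun d q => d.insert q.2 q.1)
            PySem.Dict.empty).getD q.1 npr, q.2) : Lex (Int × Int)))
      hperm (by simpa only [hkey] using hpw)
  rw [hsorted]
  -- evaluate A
  unfold pvTailA
  rw [foldA_eq fs _ _ (by intro x; rw [PySem.Set.mem_ofList])]
  -- compare the two halves
  rw [List.map_append]
  simp only [show (fun q : String × Int => q.1) = (Prod.fst : String × Int → String) from rfl]
  congr 1
  · -- priority part
    rw [hysA, filterMap_find?_map_fst]
    apply List.filter_congr
    intro f hf
    rw [Bool.eq_iff_iff, List.find?_isSome]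
    simp only [PySem.Set.contains_iff, PySem.Set.mem_ofList]
    constructor
    · intro hffs
      have hm : f ∈ uniq.map Prod.fst := by
        rw [hfst, mem_pvAdd]; exact ⟨hffs, by simp⟩
      rcases List.mem_map.1 hm with ⟨q, hq, hq1⟩
      exact ⟨q, hq, by simp [hq1]⟩
    · rintro ⟨q, hq, hq1⟩
      have hm : q.1 ∈ uniq.map Prod.fst := List.mem_map_of_mem hq
      rw [hfst, mem_pvAdd] at hm
      exact (show q.1 = f by simpa using hq1) ▸ hm.1
  · -- rest part
    have hmapB : List.map Prod.fst ysB
        = (uniq.map Prod.fst).filter (fun x => !decide (x ∈ p)) := by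
      rw [hysB]; exact (@List.filter_map _ _ Prod.fst (fun x => !decide (x ∈ p)) uniq).symm
    rw [hmapB, hfst,
      pvAdd_eq_filter fs (p.filter (fun field => PySem.Set.contains (PySem.Set.ofList fs) field))]
    apply List.filter_congr
    intro x hx
    have hxfs : x ∈ fs := ((mem_pvAdd fs [] x).1 hx).1
    rw [Bool.eq_iff_iff]
    simp [hxfs]

-- ===== VERDICT (by name: the statement is the Claim_ definition above) =====
theorem order_fields_for_table_spec : Claim_equal_order_fields_for_table := by
  intro table fields _
  unfold Spec_order_fields_for_table order_fields_for_table order_fields_for_table_alt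
  by_cases h1 : table = "Design"
  · subst h1
    rw [show pvPriorities.get? "Design" = some pvPriorityDesign from by decide]
    simp only [BEq.rfl, if_true]
    exact pvTail_eq pvPriorityDesign (by decide) fields
  · by_cases h2 : table = "Stat_Reg"
    · subst h2
      rw [show pvPriorities.get? "Stat_Reg" = some pvPriorityStatReg from by decide]
      simp only [show (("Stat_Reg" : String) == "Design") = false from by decide, BEq.rfl, if_true]
      exact pvTail_eq pvPriorityStatReg (by decide) fields
    · by_cases h3 : table = "Endpoints"
      · subst h3
        rw [show pvPriorities.get? "Endpoints" = some pvPriorityEndpoints from by decide]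
        simp only [show (("Endpoints" : String) == "Design") = false from by decide,
          show (("Endpoints" : String) == "Stat_Reg") = false from by decide, BEq.rfl, if_true]
        exact pvTail_eq pvPriorityEndpoints (by decide) fields
      · have hg : pvPriorities.get? table = none := by
          rw [show pvPriorities = PySem.Dict.mk
            [("Design", pvPriorityDesign), ("Stat_Reg", pvPriorityStatReg),
             ("Endpoints", pvPriorityEndpoints)] from rfl]
          rw [PySem.Dict.get?_mk_cons, PySem.Dict.get?_mk_cons, PySem.Dict.get?_mk_cons]
          have e1 : (("Design" : String) == table) = false :=
            beq_eq_false_iff_ne.mpr (fun h => h1 h.symm)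
          have e2 : (("Stat_Reg" : String) == table) = false :=
            beq_eq_false_iff_ne.mpr (fun h => h2 h.symm)
          have e3 : (("Endpoints" : String) == table) = false :=
            beq_eq_false_iff_ne.mpr (fun h => h3 h.symm)
          simp only [e1, e2, e3, Bool.false_eq_true, if_false]
          rfl
        rw [hg]
        simp [h1, h2, h3]
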